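-- pv_equiv track=rewrite | github.com/1ucasvb-research/TCSMS | DCPatterns.py | DCPatterns
-- ===== SOURCE A (Python) =====
-- def DCPatterns(seq):
-- 	L = len(seq)
-- 	patts = []
-- 	dc = 0
-- 	found = False
-- 	while not found:
-- 		dc += 1
-- 		for l1 in range(dc):
-- 			l2 = dc - l1
-- 			match = True
-- 			for i in range(L - dc):
-- 				if seq[dc+i] != seq[l1+(i % l2)]:
-- 					match = False
-- 					break
-- 			if match:
-- 				found = True
-- 				patts.append((seq[0:l1],seq[l1:l1+l2]))
-- 	return dc, patts
-- ===== SOURCE B (Python) =====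
-- def DCPatterns(seq):
--     # For each candidate block length l2, one left-to-right scan finds thr[l2]:
--     # the smallest dc (>= l2) such that seq[j] == seq[j - l2] for every j in [dc, L),
--     # i.e. l2 is a period of the suffix seq[dc-l2:].  The answer dc is the minimum
--     # threshold, and the patterns at dc are exactly the l2 with thr[l2] <= dc.
--     L = len(seq)
--     n = max(L, 1)
--     thr = []
--     for l2 in range(1, n + 1):
--         t = l2
--         for j in range(l2, L):
--             if seq[j] != seq[j - l2]:
--                 t = j + 1
--         thr.append(t)
--     dc = min(thr)
--     patts = [(seq[:dc - l2], seq[dc - l2:dc]) for l2 in range(dc, 0, -1) if thr[l2 - 1] <= dc]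
--     return dc, patts
-- ===== Notes on version B (the rewrite author's own statement) =====
-- stated objective: faster
-- what changed: Instead of growing dc and re-testing every split with the O(L) modular comparison loop (O(L^3)), B does one left-to-right scan per block length l2 computing the least dc from which l2 is a period of the tail, takes the minimum threshold as dc, and reads the matching splits off the threshold table (O(L^2)).
import Mathlib
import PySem

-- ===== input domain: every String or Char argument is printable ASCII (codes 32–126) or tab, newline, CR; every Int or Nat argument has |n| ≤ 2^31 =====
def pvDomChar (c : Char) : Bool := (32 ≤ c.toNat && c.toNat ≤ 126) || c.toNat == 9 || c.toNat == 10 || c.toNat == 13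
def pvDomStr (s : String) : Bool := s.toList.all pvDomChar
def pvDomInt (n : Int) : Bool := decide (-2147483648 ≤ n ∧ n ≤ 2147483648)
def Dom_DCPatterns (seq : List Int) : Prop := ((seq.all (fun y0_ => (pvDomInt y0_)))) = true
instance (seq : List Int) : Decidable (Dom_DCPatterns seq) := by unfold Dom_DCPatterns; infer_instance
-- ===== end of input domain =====

-- B replaces A's O(L^3) grow-dc-and-retry search by one O(L^2) pass: for every block
-- length l2 a single scan finds the least dc from which l2 is a period of the tail,
-- and the answer is the minimum of those thresholds (objective: faster, asymptotic).

-- ===== PORT A =====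
-- inner 'for i in range(L - dc)' loop with break: the loop's value is 'all i match'.
-- Indices dc+i and l1+(i % l2) are always in range when the loop body runs, so the
-- total pyGetD (default 0) is exact here (Python never raises in A).
def pvAInner (seq : List Int) (dc l1 : Int) : Bool :=
  (PySem.List.pyRange 0 ((seq.length : Int) - dc) 1).all fun i =>
    PySem.List.pyGetD seq (dc + i) 0 == PySem.List.pyGetD seq (l1 + PySem.Int.mod i (dc - l1)) 0

-- the 'for l1 in range(dc)' loop over the state (found, patts)
def pvAScan (seq : List Int) (dc : Int) (patts : List (List Int × List Int)) :
    Bool × List (List Int × List Int) :=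
  (PySem.List.pyRange 0 dc 1).foldl (init := (false, patts)) fun st l1 =>
    if pvAInner seq dc l1 then
      (true, st.2 ++ [(PySem.List.slice seq (some 0) (some l1),
                       PySem.List.slice seq (some l1) (some (l1 + (dc - l1))))])
    else st

-- the 'while not found' loop; fuel L+1 suffices (at dc = max(L,1) every split matches)
def pvALoop (seq : List Int) : Nat → Int → List (List Int × List Int) → Int × List (List Int × List Int)
  | 0, dc, patts => (dc, patts)
  | f + 1, dc, patts =>
      let dc' := dc + 1
      let r := pvAScan seq dc' patts
      if r.1 then (dc', r.2) else pvALoop seq f dc' r.2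

def DCPatterns (seq : List Int) : Int × (List (List Int × List Int)) :=
  pvALoop seq (seq.length + 1) 0 []

-- ===== PORT B =====
-- 't = l2; for j in range(l2, L): if seq[j] != seq[j-l2]: t = j + 1' (indices in range)
def pvBRow (seq : List Int) (l2 : Int) : Int :=
  (PySem.List.pyRange l2 (seq.length : Int) 1).foldl (init := l2) fun t j =>
    if PySem.List.pyGetD seq j 0 ≠ PySem.List.pyGetD seq (j - l2) 0 then j + 1 else t

-- 'thr = []; for l2 in range(1, n+1): … thr.append(t)'
def pvBThr (seq : List Int) : List Int :=
  (PySem.List.pyRange 1 (max (seq.length : Int) 1 + 1) 1).foldl (init := []) fun thr l2 =>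
    thr ++ [pvBRow seq l2]

def DCPatterns_alt (seq : List Int) : Int × (List (List Int × List Int)) :=
  let thr := pvBThr seq
  -- min(thr): thr is nonempty, so Python's min returns; the index l2-1 is in range
  let dc := (PySem.List.min? thr (fun x => x)).getD 0
  let patts := ((PySem.List.pyRange dc 0 (-1)).filter fun l2 =>
      decide (PySem.List.pyGetD thr (l2 - 1) 0 ≤ dc)).map fun l2 =>
      (PySem.List.slice seq none (some (dc - l2)),
       PySem.List.slice seq (some (dc - l2)) (some dc))
  (dc, patts)

-- ===== PRECONDITION & SPEC =====
def Spec_DCPatterns (seq : List Int) (out : Int × (List (List Int × List Int))) : Prop := out = DCPatterns_alt seq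
instance (seq : List Int) (out : Int × (List (List Int × List Int))) : Decidable (Spec_DCPatterns seq out) := by unfold Spec_DCPatterns; infer_instance

-- ===== CLAIM (what is proved, stated in full; the proofs are below) =====
def Claim_equal_DCPatterns : Prop := ∀ (seq : List Int), Dom_DCPatterns seq → Spec_DCPatterns seq (DCPatterns seq)

-- ===== LEMMAS AND PROOFS =====

-- Nat-level view: pvG is the sequence, pvShiftOK l2 d says 'l2 is a period of the tail from d';
-- pvNatRow/pvRowN mirror B's row scan; pvAPat is the pattern pair A appends.
def pvG (seq : List Int) (j : Nat) : Int := seq.getD j 0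
def pvShiftOK (seq : List Int) (l2 d : Nat) : Prop :=
  ∀ j : Nat, d ≤ j → j < seq.length → pvG seq j = pvG seq (j - l2)
def pvNatRow (seq : List Int) (l2 m : Nat) : Nat :=
  (List.range m).foldl (fun t k => if pvG seq (l2 + k) ≠ pvG seq k then l2 + k + 1 else t) l2
def pvRowN (seq : List Int) (l2 : Nat) : Nat := pvNatRow seq l2 (seq.length - l2)
def pvAPat (seq : List Int) (dc l1 : Int) : List Int × List Int :=
  (PySem.List.slice seq (some 0) (some l1), PySem.List.slice seq (some l1) (some (l1 + (dc - l1))))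

theorem pvNatRow_iff (seq : List Int) (l2 m d : Nat) :
    pvNatRow seq l2 m ≤ d ↔ l2 ≤ d ∧ ∀ k < m, pvG seq (l2 + k) ≠ pvG seq k → l2 + k + 1 ≤ d := by
  induction m with
  | zero => simp [pvNatRow]
  | succ m ih =>
    unfold pvNatRow at ih ⊢
    rw [List.range_succ, List.foldl_append]
    simp only [List.foldl_cons, List.foldl_nil]
    by_cases h : pvG seq (l2 + m) ≠ pvG seq m
    · simp only [if_pos h]
      constructor
      · intro hd
        refine ⟨by omega, fun k hk hmk => ?_⟩
        omega
      · intro ⟨_, hall⟩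
        exact hall m (by omega) h
    · simp only [if_neg h]
      rw [ih]
      constructor
      · intro ⟨h1, h2⟩
        refine ⟨h1, fun k hk hmk => ?_⟩
        rcases Nat.lt_succ_iff_lt_or_eq.mp hk with hlt | rfl
        · exact h2 k hlt hmk
        · exact absurd hmk h
      · intro ⟨h1, h2⟩
        exact ⟨h1, fun k hk hmk => h2 k (by omega) hmk⟩

theorem pvFoldCast (l : List Nat) (p : Nat → Prop) [DecidablePred p] (h : Nat → Nat) (a : Nat) :
    l.foldl (fun (t : Int) k => if p k then ((h k : Nat) : Int) else t) (a : Int)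
      = ((l.foldl (fun t k => if p k then h k else t) a : Nat) : Int) := by
  induction l generalizing a with
  | nil => rfl
  | cons x xs ih =>
    simp only [List.foldl_cons]
    by_cases hp : p x
    · simp only [if_pos hp]; exact ih (h x)
    · simp only [if_neg hp]; exact ih a

theorem pvBRow_eq (seq : List Int) (l2 : Nat) :
    pvBRow seq (l2 : Int) = (pvNatRow seq l2 (seq.length - l2) : Nat) := by
  unfold pvBRow pvNatRow
  rw [PySem.List.pyRange_one, List.foldl_map]
  have hn : (((seq.length : Int)) - (l2 : Int)).toNat = seq.length - l2 := by omega
  rw [hn]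
  have hstep : ∀ (t : Int) (k : Nat),
      (if PySem.List.pyGetD seq ((l2 : Int) + k) 0 ≠ PySem.List.pyGetD seq ((l2 : Int) + k - l2) 0
        then (l2 : Int) + k + 1 else t)
      = (if pvG seq (l2 + k) ≠ pvG seq k then ((l2 + k + 1 : Nat) : Int) else t) := by
    intro t k
    have h1 : ((l2 : Int) + k) = ((l2 + k : Nat) : Int) := by push_cast; ring
    have h2 : ((l2 : Int) + k - l2) = ((k : Nat) : Int) := by push_cast; ring
    rw [h1]
    rw [show ((l2 + k : Nat) : Int) - (l2 : Int) = ((k : Nat) : Int) by push_cast; ring]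
    rw [PySem.List.pyGetD_natCast, PySem.List.pyGetD_natCast]
    simp only [pvG]
    split <;> [skip; rfl]
    push_cast; ring
  calc (List.range (seq.length - l2)).foldl
        (fun (t : Int) (k : Nat) => if PySem.List.pyGetD seq ((l2:Int) + (k:Int)) 0 ≠ PySem.List.pyGetD seq ((l2:Int) + (k:Int) - l2) 0 then (l2:Int) + (k:Int) + 1 else t) (l2 : Int)
      = (List.range (seq.length - l2)).foldl
        (fun (t : Int) k => if pvG seq (l2 + k) ≠ pvG seq k then ((l2 + k + 1 : Nat) : Int) else t) (l2 : Int) := by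
        apply PySem.List.foldl_congr_mem; intro acc x _; exact hstep acc x
    _ = _ := pvFoldCast _ (fun k => pvG seq (l2 + k) ≠ pvG seq k) (fun k => l2 + k + 1) l2

theorem pvRow_iff (seq : List Int) (l2 d : Nat) :
    pvNatRow seq l2 (seq.length - l2) ≤ d ↔ l2 ≤ d ∧ pvShiftOK seq l2 d := by
  rw [pvNatRow_iff]
  constructor
  · rintro ⟨h1, h⟩
    refine ⟨h1, fun j hd hj => ?_⟩
    by_contra hne
    have hl2j : l2 ≤ j := le_trans h1 hd
    have := h (j - l2) (by omega) (by rw [show l2 + (j - l2) = j by omega]; exact fun he => hne (by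
      rw [he]))
    omega
  · rintro ⟨h1, h⟩
    refine ⟨h1, fun k hk hne => ?_⟩
    by_contra hlt
    exact hne (by have := h (l2 + k) (by omega) (by omega); rwa [show l2 + k - l2 = k by omega] at this)

theorem pvAInner_eq_nat (seq : List Int) (l1 l2 : Nat) :
    (pvAInner seq ((l1 + l2 : Nat) : Int) (l1 : Int) = true)
      ↔ ∀ i, i < seq.length - (l1 + l2) → pvG seq (l1 + l2 + i) = pvG seq (l1 + i % l2) := by
  unfold pvAInner
  rw [PySem.List.pyRange_one, List.all_map, List.all_eq_true]
  have hn : (((seq.length : Int)) - ((l1 + l2 : Nat) : Int) - 0).toNat = seq.length - (l1 + l2) := by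
    omega
  rw [hn]
  constructor
  · intro h i hi
    have := h i (List.mem_range.mpr hi)
    simp only [Function.comp] at this
    rw [show (0 : Int) + (i : Nat) = ((i : Nat) : Int) by ring] at this
    rw [show ((l1 + l2 : Nat) : Int) + ((i : Nat) : Int) = ((l1 + l2 + i : Nat) : Int) by push_cast; ring] at this
    rw [show ((l1 + l2 : Nat) : Int) - ((l1 : Nat) : Int) = ((l2 : Nat) : Int) by push_cast; ring] at this
    rw [PySem.Int.mod_natCast] at this
    rw [show ((l1 : Nat) : Int) + ((i % l2 : Nat) : Int) = ((l1 + i % l2 : Nat) : Int) by push_cast; ring] at this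
    rw [PySem.List.pyGetD_natCast, PySem.List.pyGetD_natCast, beq_iff_eq] at this
    exact this
  · intro h i hi
    have hi' := List.mem_range.mp hi
    simp only [Function.comp]
    rw [show (0 : Int) + (i : Nat) = ((i : Nat) : Int) by ring]
    rw [show ((l1 + l2 : Nat) : Int) + ((i : Nat) : Int) = ((l1 + l2 + i : Nat) : Int) by push_cast; ring]
    rw [show ((l1 + l2 : Nat) : Int) - ((l1 : Nat) : Int) = ((l2 : Nat) : Int) by push_cast; ring]
    rw [PySem.Int.mod_natCast]
    rw [show ((l1 : Nat) : Int) + ((i % l2 : Nat) : Int) = ((l1 + i % l2 : Nat) : Int) by push_cast; ring]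
    rw [PySem.List.pyGetD_natCast, PySem.List.pyGetD_natCast, beq_iff_eq]
    exact h i hi'

theorem pvAInner_iff (seq : List Int) (l1 l2 : Nat) (h2 : 0 < l2) :
    (pvAInner seq ((l1 + l2 : Nat) : Int) (l1 : Int) = true) ↔ pvShiftOK seq l2 (l1 + l2) := by
  rw [pvAInner_eq_nat]
  constructor
  · intro h j hd hj
    set i := j - (l1 + l2) with hi
    have hij : j = l1 + l2 + i := by omega
    have hiL : i < seq.length - (l1 + l2) := by omega
    rw [hij, h i hiL]
    by_cases hc : i < l2
    · rw [Nat.mod_eq_of_lt hc]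
      congr 1
      omega
    · push_neg at hc
      have hrec : l1 + l2 + i - l2 = l1 + l2 + (i - l2) := by omega
      rw [hrec, h (i - l2) (by omega)]
      congr 1
      rw [Nat.mod_eq_sub_mod hc]
  · intro h i
    induction i using Nat.strong_induction_on with
    | _ i ih =>
      intro hi
      have hj : l1 + l2 + i < seq.length := by omega
      have h1 := h (l1 + l2 + i) (by omega) hj
      rw [show l1 + l2 + i - l2 = l1 + i by omega] at h1
      by_cases hc : i < l2
      · rw [h1, Nat.mod_eq_of_lt hc]
      · push_neg at hc
        have hrec := ih (i - l2) (by omega) (by omega)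
        rw [show l1 + l2 + (i - l2) = l1 + i by omega] at hrec
        rw [h1, hrec, Nat.mod_eq_sub_mod hc]

theorem pvAScan_eq (seq : List Int) (dc : Int) (patts : List (List Int × List Int)) :
    pvAScan seq dc patts =
      ((PySem.List.pyRange 0 dc 1).any (fun l1 => pvAInner seq dc l1),
       patts ++ ((PySem.List.pyRange 0 dc 1).filter (fun l1 => pvAInner seq dc l1)).map
         (fun l1 => pvAPat seq dc l1)) := by
  unfold pvAScan
  have hcg : (PySem.List.pyRange 0 dc 1).foldl (fun st l1 =>
      if pvAInner seq dc l1 then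
        (true, st.2 ++ [(PySem.List.slice seq (some 0) (some l1),
                         PySem.List.slice seq (some l1) (some (l1 + (dc - l1))))])
      else st) ((false, patts) : Bool × List (List Int × List Int)) =
    (PySem.List.pyRange 0 dc 1).foldl (fun st l1 =>
      ((fun (b : Bool) l1 => if pvAInner seq dc l1 then true else b) st.1 l1,
       (fun acc l1 => if pvAInner seq dc l1 then acc ++ [pvAPat seq dc l1] else acc) st.2 l1))
      (false, patts) := by
    apply PySem.List.foldl_congr_mem
    intro acc x _
    by_cases h : pvAInner seq dc x <;> simp [h, pvAPat]
  rw [hcg, PySem.List.foldl_prod_mk (f := fun (b : Bool) l1 => if pvAInner seq dc l1 then true else b) (g := fun acc l1 => if pvAInner seq dc l1 then acc ++ [pvAPat seq dc l1] else acc), PySem.List.foldl_if_true_eq, PySem.List.foldl_append_if]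
  simp

theorem pvRowN_iff (seq : List Int) (l2 d : Nat) :
    pvRowN seq l2 ≤ d ↔ l2 ≤ d ∧ pvShiftOK seq l2 d := pvRow_iff seq l2 d

theorem pvRowN_le_n (seq : List Int) (k : Nat) (hk : k < max seq.length 1) :
    pvRowN seq (k + 1) ≤ max seq.length 1 := by
  rw [pvRowN, pvNatRow_iff]
  exact ⟨by omega, fun kk hkk _ => by omega⟩

theorem pvRowN_ge (seq : List Int) (l2 : Nat) : l2 ≤ pvRowN seq l2 := by
  have := (pvRow_iff seq l2 (pvRowN seq l2)).mp le_rfl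
  exact this.1

theorem pvBThr_eq (seq : List Int) :
    pvBThr seq = (List.range (max seq.length 1)).map (fun k => ((pvRowN seq (k + 1) : Nat) : Int)) := by
  unfold pvBThr
  rw [PySem.List.pyRange_one, List.foldl_map]
  have hn : (max (seq.length : Int) 1 + 1 - 1).toNat = max seq.length 1 := by omega
  rw [hn]
  have hcg : (List.range (max seq.length 1)).foldl
        (fun (x : List Int) (y : Nat) => x ++ [pvBRow seq ((1 : Int) + y)]) []
      = (List.range (max seq.length 1)).foldl
        (fun x y => x ++ [((pvRowN seq (y + 1) : Nat) : Int)]) [] := by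
    apply PySem.List.foldl_congr_mem
    intro acc k _
    have h1 : (1 : Int) + (k : Nat) = ((k + 1 : Nat) : Int) := by push_cast; ring
    rw [h1, pvBRow_eq]
    rfl
  rw [hcg, PySem.List.foldl_append_singleton_eq_map]
  rfl

-- minimum threshold M
theorem pvMin_spec (seq : List Int) :
    ∃ M : Nat, (PySem.List.min? (pvBThr seq) (fun x => x)).getD 0 = (M : Int)
      ∧ (∃ k < max seq.length 1, M = pvRowN seq (k + 1))
      ∧ (∀ k < max seq.length 1, M ≤ pvRowN seq (k + 1)) := by
  have hne : pvBThr seq ≠ [] := by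
    rw [pvBThr_eq]
    simp [List.range_eq_nil]
  obtain ⟨m, hm⟩ : ∃ m, PySem.List.min? (pvBThr seq) (fun x => x) = some m := by
    rcases h : PySem.List.min? (pvBThr seq) (fun x => x) with _ | m
    · exact absurd ((PySem.List.min?_eq_none_iff _ _).mp h) hne
    · exact ⟨m, rfl⟩
  have hmem := PySem.List.min?_mem hm
  have hmin := PySem.List.min?_isMin hm
  rw [pvBThr_eq] at hmem hmin
  rw [List.mem_map] at hmem
  obtain ⟨k, hkmem, hkm⟩ := hmem
  rw [List.mem_range] at hkmem
  have hk := hkmem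
  have hkm := hkm.symm
  refine ⟨pvRowN seq (k + 1), ?_, ⟨k, hk, rfl⟩, ?_⟩
  · rw [hm]; simpa using hkm
  · intro k' hk'
    have := hmin ((pvRowN seq (k' + 1) : Nat) : Int) (by
      simp only [List.mem_map, List.mem_range]
      exact ⟨k', hk', rfl⟩)
    rw [hkm] at this
    exact_mod_cast this

theorem pvFound_iff (seq : List Int) (M dc : Nat) (hdc : 1 ≤ dc)
    (hex : ∃ k < max seq.length 1, M = pvRowN seq (k + 1))
    (hmin : ∀ k < max seq.length 1, M ≤ pvRowN seq (k + 1)) :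
    ((PySem.List.pyRange 0 (dc : Int) 1).any (fun l1 => pvAInner seq (dc : Int) l1) = true)
      ↔ M ≤ dc := by
  have hMn : M ≤ max seq.length 1 := by
    obtain ⟨k, hk, rfl⟩ := hex
    exact pvRowN_le_n seq k hk
  rw [List.any_eq_true]
  constructor
  · rintro ⟨x, hx, hinner⟩
    rw [PySem.List.mem_pyRange_one] at hx
    obtain ⟨l1, rfl⟩ : ∃ l1 : Nat, x = (l1 : Int) := ⟨x.toNat, by omega⟩
    have hl1 : l1 < dc := by exact_mod_cast hx.2
    set l2 := dc - l1 with hl2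
    have hdceq : ((dc : Nat) : Int) = ((l1 + l2 : Nat) : Int) := by push_cast; omega
    rw [hdceq] at hinner
    have hsh := (pvAInner_iff seq l1 l2 (by omega)).mp hinner
    rw [show l1 + l2 = dc by omega] at hsh
    by_cases hln : l2 ≤ max seq.length 1
    · have : pvRowN seq l2 ≤ dc := by
        rw [pvRowN_iff]; exact ⟨by omega, hsh⟩
      have h2 := hmin (l2 - 1) (by omega)
      rw [show l2 - 1 + 1 = l2 by omega] at h2
      omega
    · omega
  · intro hMdc
    obtain ⟨k, hk, rfl⟩ := hex
    obtain ⟨hle, hsh⟩ := (pvRowN_iff seq (k + 1) dc).mp hMdc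
    refine ⟨((dc - (k + 1) : Nat) : Int), ?_, ?_⟩
    · rw [PySem.List.mem_pyRange_one]; omega
    · have hdceq : ((dc : Nat) : Int) = (((dc - (k + 1)) + (k + 1) : Nat) : Int) := by push_cast; omega
      rw [hdceq]
      rw [pvAInner_iff seq _ _ (by omega)]
      rw [show (dc - (k + 1)) + (k + 1) = dc by omega]
      exact hsh

theorem pvALoop_run (seq : List Int) (M : Nat)
    (hfound : ∀ dc : Nat, 1 ≤ dc →
      (((PySem.List.pyRange 0 (dc : Int) 1).any (fun l1 => pvAInner seq (dc : Int) l1) = true) ↔ M ≤ dc)) :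
    ∀ (f : Nat) (dc : Nat) (patts : List (List Int × List Int)), dc < M → M ≤ dc + f →
      pvALoop seq f (dc : Int) patts =
        ((M : Int), patts ++ ((PySem.List.pyRange 0 (M : Int) 1).filter
          (fun l1 => pvAInner seq (M : Int) l1)).map (fun l1 => pvAPat seq (M : Int) l1)) := by
  intro f
  induction f with
  | zero => intro dc patts h1 h2; omega
  | succ f ih =>
    intro dc patts h1 h2
    have hcast : (dc : Int) + 1 = ((dc + 1 : Nat) : Int) := by push_cast; ring
    simp only [pvALoop, hcast, pvAScan_eq]
    by_cases hM : M ≤ dc + 1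
    · have hMeq : M = dc + 1 := by omega
      rw [if_pos (show _ = true from (hfound (dc+1) (by omega)).mpr hM)]
      rw [hMeq]
    · have hany : ((PySem.List.pyRange 0 ((dc+1 : Nat) : Int) 1).any
          (fun l1 => pvAInner seq ((dc+1 : Nat) : Int) l1)) = false := by
        rw [Bool.eq_false_iff]
        intro hc
        exact hM ((hfound (dc+1) (by omega)).mp hc)
      rw [if_neg (fun hc => hM ((hfound (dc+1) (by omega)).mp hc))]
      have hfilter : ((PySem.List.pyRange 0 ((dc+1 : Nat) : Int) 1).filter
          (fun l1 => pvAInner seq ((dc+1 : Nat) : Int) l1)) = [] := by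
        rw [List.filter_eq_nil_iff]
        intro a ha
        have := List.any_eq_false.mp hany a ha
        simpa using this
      rw [hfilter]
      simp only [List.map_nil, List.append_nil]
      exact ih (dc + 1) patts (by omega) (by omega)

theorem pvPatts_eq (seq : List Int) (M : Nat) (hM1 : 1 ≤ M) (hMn : M ≤ max seq.length 1)
    (hmin : ∀ k < max seq.length 1, M ≤ pvRowN seq (k + 1)) :
    ((PySem.List.pyRange (M : Int) 0 (-1)).filter (fun l2 =>
        decide (PySem.List.pyGetD (pvBThr seq) (l2 - 1) 0 ≤ (M : Int)))).map (fun l2 =>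
        (PySem.List.slice seq none (some ((M : Int) - l2)),
         PySem.List.slice seq (some ((M : Int) - l2)) (some (M : Int))))
      = ((PySem.List.pyRange 0 (M : Int) 1).filter (fun l1 => pvAInner seq (M : Int) l1)).map
          (fun l1 => pvAPat seq (M : Int) l1) := by
  rw [PySem.List.pyRange_neg_one, PySem.List.pyRange_one]
  rw [show ((M : Int) - 0).toNat = M by omega]
  rw [List.filter_map, List.filter_map, List.map_map, List.map_map]
  simp only [Function.comp_def]
  have hfeq : ∀ k ∈ List.range M,
      (decide (PySem.List.pyGetD (pvBThr seq) ((M : Int) - (k : Nat) - 1) 0 ≤ (M : Int)))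
        = pvAInner seq (M : Int) ((0 : Int) + (k : Nat)) := by
    intro k hk
    have hkM : k < M := List.mem_range.mp hk
    have hidx : (M : Int) - (k : Nat) - 1 = ((M - k - 1 : Nat) : Int) := by push_cast; omega
    rw [hidx, PySem.List.pyGetD_natCast, pvBThr_eq, PySem.List.getD_map_range _ _ _ _ (by omega)]

    rw [show M - k - 1 + 1 = M - k by omega]
    have hrow : ((pvRowN seq (M - k) : Nat) : Int) ≤ (M : Int) ↔ pvRowN seq (M - k) ≤ M := by
      exact_mod_cast Iff.rfl
    have hinner : ((0 : Int) + (k : Nat)) = ((k : Nat) : Int) := by ring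
    rw [hinner]
    have hdceq : ((M : Nat) : Int) = ((k + (M - k) : Nat) : Int) := by push_cast; omega
    have hiff : (pvAInner seq ((M : Nat) : Int) ((k : Nat) : Int) = true) ↔ pvRowN seq (M - k) ≤ M := by
      rw [hdceq, pvAInner_iff seq k (M - k) (by omega), show k + (M - k) = M by omega,
        pvRowN_iff]
      constructor
      · intro h; exact ⟨by omega, h⟩
      · intro h; exact h.2
    rw [Bool.eq_iff_iff]
    simp only [decide_eq_true_eq]
    rw [hrow, hiff]
  rw [List.filter_congr hfeq]
  apply List.map_congr_left
  intro k hk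
  have hkM : k < M := List.mem_range.mp (List.mem_of_mem_filter hk)
  simp only [pvAPat]
  have e1 : (M : Int) - ((M : Int) - (k : Nat)) = (k : Nat) := by ring
  have e2 : ((0 : Int) + (k : Nat)) = (k : Nat) := by ring
  have e3 : (k : Nat) + ((M : Int) - (k : Nat)) = (M : Int) := by ring
  rw [e1, e2, e3]
  rw [PySem.List.slice_zero_start]

theorem pvMain (seq : List Int) : DCPatterns seq = DCPatterns_alt seq := by
  obtain ⟨M, hgetD, hex, hmin⟩ := pvMin_spec seq
  have hM1 : 1 ≤ M := by
    obtain ⟨k, hk, rfl⟩ := hex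
    have := pvRowN_ge seq (k + 1); omega
  have hMn : M ≤ max seq.length 1 := by
    obtain ⟨k, hk, rfl⟩ := hex
    exact pvRowN_le_n seq k hk
  have hfound := fun dc hdc => pvFound_iff seq M dc hdc hex hmin
  have hrun := pvALoop_run seq M hfound (seq.length + 1) 0 [] (by omega) (by omega)
  simp only [Nat.cast_zero] at hrun
  simp only [DCPatterns, DCPatterns_alt]
  rw [hrun, hgetD]
  rw [pvPatts_eq seq M hM1 hMn hmin]
  simp

-- ===== VERDICT (by name: the statement is the Claim_ definition above) =====
theorem DCPatterns_spec : Claim_equal_DCPatterns := by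
  intro seq _
  unfold Spec_DCPatterns
  exact pvMain seq
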